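-- pv_equiv track=rewrite | github.com/Salma-Yassin/Graduation-Project-Customer-Satisfaction-Detection-Using-DeepLearning | apps/helpers.py | sorting_video_face
-- ===== SOURCE A (Python) =====
-- def sorting_video_face(in_category):
--     # sorted_audio = {'hap' , 'sad', 'neu', 'ang'}
--     sorted_result = {}
--
--     new_categories = {'Happy': ['Happy', 'Surprised'],
--                 'Sad': ['Sad'],
--                 'Fearful': ['Fearful'],
--                 'Neutral': ['Neutral'],
--                 'Angry': ['Angry', 'Disgusted']}
--     mapped_results = {}
--
--     for category, emotions in new_categories.items():
--         total_score = 0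
--         for emotion in emotions:
--             total_score += in_category.get(emotion, 0)
--         mapped_results[category] = total_score
--     return mapped_results
-- ===== SOURCE B (Python) =====
-- def sorting_video_face(in_category):
--     # One pass over the input via a reverse emotion->category map.
--     reverse_map = {'Happy': 'Happy', 'Surprised': 'Happy',
--                    'Sad': 'Sad',
--                    'Fearful': 'Fearful',
--                    'Neutral': 'Neutral',
--                    'Angry': 'Angry', 'Disgusted': 'Angry'}
--     mapped_results = {'Happy': 0, 'Sad': 0, 'Fearful': 0, 'Neutral': 0, 'Angry': 0}
--     for emotion, value in in_category.items():
--         category = reverse_map.get(emotion)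
--         if category is not None:
--             mapped_results[category] += value
--     return mapped_results
-- ===== Notes on version B (the rewrite author's own statement) =====
-- stated objective: alternative
-- what changed: Replaces the nested loop over the fixed category->emotions table with a single pass over the input items, accumulating into a pre-initialized result dict via a reverse emotion->category map.
import Mathlib
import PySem

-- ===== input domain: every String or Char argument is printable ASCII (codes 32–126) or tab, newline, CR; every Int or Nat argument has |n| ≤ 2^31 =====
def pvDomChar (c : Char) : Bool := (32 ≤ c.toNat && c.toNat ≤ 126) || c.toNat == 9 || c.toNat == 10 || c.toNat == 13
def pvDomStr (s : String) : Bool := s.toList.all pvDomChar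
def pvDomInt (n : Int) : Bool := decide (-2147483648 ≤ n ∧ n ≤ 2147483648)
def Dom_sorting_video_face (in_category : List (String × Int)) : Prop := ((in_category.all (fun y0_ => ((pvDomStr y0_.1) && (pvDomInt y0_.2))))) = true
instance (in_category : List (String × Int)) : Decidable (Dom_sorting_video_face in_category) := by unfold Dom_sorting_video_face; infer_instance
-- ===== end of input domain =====

-- B replaces A's nested loop over the fixed category table by one pass over the
-- input items through a reverse emotion->category map (alternative decomposition).


-- ===== PORT A =====
def sorting_video_face (in_category : List (String × Int)) : List (String × Int) :=
  let d : PySem.Dict String Int := PySem.Dict.mk in_category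
  let new_categories : List (String × List String) :=
    [("Happy", ["Happy", "Surprised"]),
     ("Sad", ["Sad"]),
     ("Fearful", ["Fearful"]),
     ("Neutral", ["Neutral"]),
     ("Angry", ["Angry", "Disgusted"])]
  let mapped_results : PySem.Dict String Int :=
    new_categories.foldl
      (fun m ce => m.insert ce.1 (ce.2.foldl (fun s e => s + d.getD e 0) 0))
      PySem.Dict.empty
  mapped_results.items

-- ===== PORT B =====
def pvRevMap : PySem.Dict String String :=
  PySem.Dict.mk [("Happy", "Happy"), ("Surprised", "Happy"),
                 ("Sad", "Sad"), ("Fearful", "Fearful"), ("Neutral", "Neutral"),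
                 ("Angry", "Angry"), ("Disgusted", "Angry")]

def sorting_video_face_alt (in_category : List (String × Int)) : List (String × Int) :=
  let init : PySem.Dict String Int :=
    PySem.Dict.mk [("Happy", 0), ("Sad", 0), ("Fearful", 0), ("Neutral", 0), ("Angry", 0)]
  let final : PySem.Dict String Int :=
    in_category.foldl
      (fun m p =>
        match pvRevMap.get? p.1 with
        | some c => m.modify c 0 (· + p.2)
        | none => m)
      init
  final.items

-- ===== PRECONDITION & SPEC =====
-- Pre_ excludes association lists with duplicate keys: those do not represent any
-- Python dict (A's parameter is a dict, which cannot carry duplicate keys), so no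
-- Python input is excluded; on such lists A's first-match lookup and B's summing
-- pass are both accidental.
def Pre_sorting_video_face (in_category : List (String × Int)) : Prop :=
  (in_category.map Prod.fst).Nodup
instance (in_category : List (String × Int)) : Decidable (Pre_sorting_video_face in_category) := by unfold Pre_sorting_video_face; infer_instance

def pvWitness_sorting_video_face : (List (String × Int)) := [("Happy", 3), ("Disgusted", 2), ("Sad", -1)]

def Spec_sorting_video_face (in_category : List (String × Int)) (out : List (String × Int)) : Prop := out = sorting_video_face_alt in_category
instance (in_category : List (String × Int)) (out : List (String × Int)) : Decidable (Spec_sorting_video_face in_category out) := by unfold Spec_sorting_video_face; infer_instance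

-- ===== CLAIM (what is proved, stated in full; the proofs are below) =====
def Claim_equal_sorting_video_face : Prop := ∀ (in_category : List (String × Int)), Dom_sorting_video_face in_category → Pre_sorting_video_face in_category → Spec_sorting_video_face in_category (sorting_video_face in_category)

-- ===== LEMMAS AND PROOFS =====

-- sum of the values filed under key k (all occurrences)
def pvT (k : String) (xs : List (String × Int)) : Int :=
  ((xs.filter (fun p => p.1 == k)).map Prod.snd).sum

-- sum of the values whose key is reverse-mapped to category c
def pvC (c : String) (xs : List (String × Int)) : Int :=
  ((xs.filter (fun p => pvRevMap.get? p.1 == some c)).map Prod.snd).sum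

theorem pvRev_eval (s : String) :
    pvRevMap.get? s =
      (if "Happy" = s then some "Happy" else if "Surprised" = s then some "Happy"
       else if "Sad" = s then some "Sad" else if "Fearful" = s then some "Fearful"
       else if "Neutral" = s then some "Neutral" else if "Angry" = s then some "Angry"
       else if "Disgusted" = s then some "Angry" else none) := by
  simp only [pvRevMap, PySem.Dict.get?_mk_cons, beq_iff_eq]
  rfl

theorem pvRev_mem (s c : String) (h : pvRevMap.get? s = some c) :
    c ∈ (["Happy", "Sad", "Fearful", "Neutral", "Angry"] : List String) := by
  rw [pvRev_eval] at h
  split_ifs at h <;> simp_all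

theorem pvT_cons (k : String) (x : String × Int) (t : List (String × Int)) :
    pvT k (x :: t) = (if x.1 == k then x.2 else 0) + pvT k t := by
  by_cases hp : (x.1 == k) = true <;> simp [pvT, hp]

theorem pvC_cons (c : String) (x : String × Int) (t : List (String × Int)) :
    pvC c (x :: t) = (if pvRevMap.get? x.1 == some c then x.2 else 0) + pvC c t := by
  by_cases hp : (pvRevMap.get? x.1 == some c) = true <;> simp [pvC, hp]

theorem pvKeys_fold (xs : List (String × Int)) (d : PySem.Dict String Int)
    (h : ∀ s c, pvRevMap.get? s = some c → d.contains c = true) :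
    (xs.foldl
      (fun m p =>
        match pvRevMap.get? p.1 with
        | some c => m.modify c 0 (· + p.2)
        | none => m)
      d).keys = d.keys := by
  induction xs generalizing d with
  | nil => rfl
  | cons x t ih =>
    rw [List.foldl_cons]
    cases hx : pvRevMap.get? x.1 with
    | none =>
      exact ih d h
    | some c =>
      have hc : d.contains c = true := h x.1 c hx
      have hk : (d.modify c 0 (· + x.2)).keys = d.keys := by
        rw [PySem.Dict.keys_modify, PySem.Dict.keys_insert_of_contains _ _ hc]
      rw [ih _ ?_, hk]
      intro s' c' h'
      rw [PySem.Dict.contains_modify]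
      rcases eq_or_ne c' c with rfl | hne
      · simp
      · simp [h s' c' h']

theorem pvGetD_fold (xs : List (String × Int)) (d : PySem.Dict String Int) (c : String) :
    (xs.foldl
      (fun m p =>
        match pvRevMap.get? p.1 with
        | some c => m.modify c 0 (· + p.2)
        | none => m)
      d).getD c 0 = d.getD c 0 + pvC c xs := by
  induction xs generalizing d with
  | nil => simp [pvC]
  | cons x t ih =>
    rw [List.foldl_cons, pvC_cons]
    cases hx : pvRevMap.get? x.1 with
    | none =>
      rw [ih d]
      simp
    | some c0 =>
      rw [ih, PySem.Dict.getD_modify]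
      rcases eq_or_ne c c0 with rfl | hne
      · have hb : (some c == some c) = true := by simp
        rw [hb, if_pos rfl]
        simp only [if_true]
        omega
      · have hb : (some c0 == some c) = false := by
          simp [hne.symm]
        rw [hb, if_neg hne]
        simp only [Bool.false_eq_true, if_false]
        omega

theorem pvT_eq_zero_of_not_mem (k : String) (xs : List (String × Int))
    (hk : k ∉ xs.map Prod.fst) : pvT k xs = 0 := by
  unfold pvT
  have hfil : xs.filter (fun p => p.1 == k) = [] := by
    rw [List.filter_eq_nil_iff]
    intro p hp
    simp only [beq_iff_eq]
    intro hpk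
    exact hk (hpk ▸ List.mem_map_of_mem hp)
  simp [hfil]

theorem pvGetD_eq (xs : List (String × Int)) (hn : (xs.map Prod.fst).Nodup) (k : String) :
    (PySem.Dict.mk xs).getD k 0 = pvT k xs := by
  induction xs with
  | nil =>
    rw [PySem.Dict.getD_of_not_contains _ 0 (by simp [PySem.Dict.contains_mk])]
    rfl
  | cons x t ih =>
    simp only [List.map_cons, List.nodup_cons] at hn
    rw [PySem.Dict.getD_eq_get?_getD, PySem.Dict.get?_mk_cons, pvT_cons]
    by_cases hx : x.1 = k
    · subst hx
      simp [pvT_eq_zero_of_not_mem x.1 t hn.1]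
    · have hb : (x.1 == k) = false := beq_eq_false_iff_ne.mpr hx
      rw [hb]
      simp only [Bool.false_eq_true, if_false]
      rw [← PySem.Dict.getD_eq_get?_getD, ih hn.2]
      simp

theorem pvPredH (s : String) :
    (pvRevMap.get? s == some "Happy") = (s == "Happy" || s == "Surprised") := by
  rw [pvRev_eval]
  split_ifs with h1 h2 h3 h4 h5 h6 h7
  · subst h1; simp
  · subst h2; simp
  · subst h3; simp
  · subst h4; simp
  · subst h5; simp
  · subst h6; simp
  · subst h7; simp
  · have e : ∀ k : String, ¬(k = s) → (s == k) = false :=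
      fun k hk => beq_eq_false_iff_ne.mpr fun h => hk h.symm
    simp [e _ h1, e _ h2]

theorem pvPredS (s : String) :
    (pvRevMap.get? s == some "Sad") = (s == "Sad") := by
  rw [pvRev_eval]
  split_ifs with h1 h2 h3 h4 h5 h6 h7
  · subst h1; simp
  · subst h2; simp
  · subst h3; simp
  · subst h4; simp
  · subst h5; simp
  · subst h6; simp
  · subst h7; simp
  · have e : ∀ k : String, ¬(k = s) → (s == k) = false :=
      fun k hk => beq_eq_false_iff_ne.mpr fun h => hk h.symm
    simp [e _ h3]

theorem pvPredF (s : String) :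
    (pvRevMap.get? s == some "Fearful") = (s == "Fearful") := by
  rw [pvRev_eval]
  split_ifs with h1 h2 h3 h4 h5 h6 h7
  · subst h1; simp
  · subst h2; simp
  · subst h3; simp
  · subst h4; simp
  · subst h5; simp
  · subst h6; simp
  · subst h7; simp
  · have e : ∀ k : String, ¬(k = s) → (s == k) = false :=
      fun k hk => beq_eq_false_iff_ne.mpr fun h => hk h.symm
    simp [e _ h4]

theorem pvPredN (s : String) :
    (pvRevMap.get? s == some "Neutral") = (s == "Neutral") := by
  rw [pvRev_eval]
  split_ifs with h1 h2 h3 h4 h5 h6 h7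
  · subst h1; simp
  · subst h2; simp
  · subst h3; simp
  · subst h4; simp
  · subst h5; simp
  · subst h6; simp
  · subst h7; simp
  · have e : ∀ k : String, ¬(k = s) → (s == k) = false :=
      fun k hk => beq_eq_false_iff_ne.mpr fun h => hk h.symm
    simp [e _ h5]

theorem pvPredA (s : String) :
    (pvRevMap.get? s == some "Angry") = (s == "Angry" || s == "Disgusted") := by
  rw [pvRev_eval]
  split_ifs with h1 h2 h3 h4 h5 h6 h7
  · subst h1; simp
  · subst h2; simp
  · subst h3; simp
  · subst h4; simp
  · subst h5; simp
  · subst h6; simp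
  · subst h7; simp
  · have e : ∀ k : String, ¬(k = s) → (s == k) = false :=
      fun k hk => beq_eq_false_iff_ne.mpr fun h => hk h.symm
    simp [e _ h6, e _ h7]

theorem pvC_single (c : String) (hs : ∀ s : String, (pvRevMap.get? s == some c) = (s == c))
    (xs : List (String × Int)) : pvC c xs = pvT c xs := by
  induction xs with
  | nil => rfl
  | cons x t ih => rw [pvC_cons, pvT_cons, hs, ih]

theorem pvC_double (c k1 k2 : String) (hd : k1 ≠ k2)
    (hs : ∀ s : String, (pvRevMap.get? s == some c) = (s == k1 || s == k2))
    (xs : List (String × Int)) : pvC c xs = pvT k1 xs + pvT k2 xs := by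
  induction xs with
  | nil => rfl
  | cons x t ih =>
    rw [pvC_cons, pvT_cons, pvT_cons, hs, ih]
    by_cases h1 : x.1 = k1
    · have b1 : (x.1 == k1) = true := beq_iff_eq.mpr h1
      have b2 : (x.1 == k2) = false := beq_eq_false_iff_ne.mpr (h1 ▸ hd)
      rw [b1, b2]
      simp only [Bool.true_or, if_true, Bool.false_eq_true, if_false]
      omega
    · have b1 : (x.1 == k1) = false := beq_eq_false_iff_ne.mpr h1
      by_cases h2 : x.1 = k2
      · have b2 : (x.1 == k2) = true := beq_iff_eq.mpr h2
        rw [b1, b2]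
        simp only [Bool.false_or, if_true, Bool.false_eq_true, if_false]
        omega
      · have b2 : (x.1 == k2) = false := beq_eq_false_iff_ne.mpr h2
        rw [b1, b2]
        simp only [Bool.or_self, Bool.false_eq_true, if_false]
        omega

-- ===== VERDICT (by name: the statement is the Claim_ definition above) =====
theorem sorting_video_face_spec : Claim_equal_sorting_video_face := by
  intro xs _ hpre
  simp only [Spec_sorting_video_face, sorting_video_face, sorting_video_face_alt]
  rw [PySem.Dict.items_foldl_insert_fresh _ _ _ _ (by intro a _; rfl)
      (by simp [List.nodup_cons])]
  simp only [PySem.Dict.empty, List.nil_append]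
  have hkeys : (xs.foldl
      (fun m p =>
        match pvRevMap.get? p.1 with
        | some c => m.modify c 0 (· + p.2)
        | none => m)
      (PySem.Dict.mk [("Happy", 0), ("Sad", 0), ("Fearful", 0), ("Neutral", 0), ("Angry", 0)])).keys
      = ["Happy", "Sad", "Fearful", "Neutral", "Angry"] := by
    rw [pvKeys_fold _ _ ?_]
    · simp [PySem.Dict.keys_mk]
    · intro s c hsc
      have hm := pvRev_mem s c hsc
      fin_cases hm <;> simp [PySem.Dict.contains_mk]
  rw [PySem.Dict.items_eq_map_keys _ (by rw [hkeys]; simp [List.nodup_cons]) 0, hkeys]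
  have hinit : ∀ c : String,
      (PySem.Dict.mk [("Happy", (0:Int)), ("Sad", 0), ("Fearful", 0), ("Neutral", 0), ("Angry", 0)]).getD c 0
        = 0 := by
    intro c
    rw [PySem.Dict.getD_eq_get?_getD]
    rw [PySem.Dict.get?_mk_cons, PySem.Dict.get?_mk_cons, PySem.Dict.get?_mk_cons,
        PySem.Dict.get?_mk_cons, PySem.Dict.get?_mk_cons]
    split_ifs <;> rfl
  simp only [List.map_cons, List.map_nil, List.foldl_cons, List.foldl_nil]
  rw [pvGetD_fold, pvGetD_fold, pvGetD_fold, pvGetD_fold, pvGetD_fold,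
      hinit, hinit, hinit, hinit, hinit,
      pvC_double "Happy" "Happy" "Surprised" (by simp) pvPredH,
      pvC_single "Sad" pvPredS, pvC_single "Fearful" pvPredF,
      pvC_single "Neutral" pvPredN,
      pvC_double "Angry" "Angry" "Disgusted" (by simp) pvPredA,
      pvGetD_eq xs hpre, pvGetD_eq xs hpre, pvGetD_eq xs hpre, pvGetD_eq xs hpre,
      pvGetD_eq xs hpre, pvGetD_eq xs hpre, pvGetD_eq xs hpre]
  simp only [zero_add]
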